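-- pv_equiv track=rewrite | github.com/raghuveer553/codespaces-blank | practice/Hashing/P7.py | sum_of_elements_whose_freq_is_greater_than_self
-- ===== SOURCE A (Python) =====
-- def sum_of_elements_whose_freq_is_greater_than_self(nums):
--     the_dict = {}
--     to_return = 0
--     for num in nums:
--         the_dict[num] = the_dict.get(num, 0) + 1
--     for num in the_dict:
--         if the_dict[num] >= num:
--             to_return += num
--     return to_return
-- ===== SOURCE B (Python) =====
-- def sum_of_elements_whose_freq_is_greater_than_self(nums):
--     # Sort a copy and scan runs of equal values: each run's length is the
--     # value's frequency, so add the value when the run is at least that long.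
--     s = sorted(nums)
--     total = 0
--     i = 0
--     n = len(s)
--     while i < n:
--         v = s[i]
--         j = i
--         while j < n and s[j] == v:
--             j += 1
--         if j - i >= v:
--             total += v
--         i = j
--     return total
-- ===== Notes on version B (the rewrite author's own statement) =====
-- stated objective: alternative
-- what changed: Replaces the hash-map frequency table and dict-key pass with a sort-then-run-scan: sort a copy of nums and walk maximal runs of equal values, adding the value when the run length (its frequency) meets it.
import Mathlib
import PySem

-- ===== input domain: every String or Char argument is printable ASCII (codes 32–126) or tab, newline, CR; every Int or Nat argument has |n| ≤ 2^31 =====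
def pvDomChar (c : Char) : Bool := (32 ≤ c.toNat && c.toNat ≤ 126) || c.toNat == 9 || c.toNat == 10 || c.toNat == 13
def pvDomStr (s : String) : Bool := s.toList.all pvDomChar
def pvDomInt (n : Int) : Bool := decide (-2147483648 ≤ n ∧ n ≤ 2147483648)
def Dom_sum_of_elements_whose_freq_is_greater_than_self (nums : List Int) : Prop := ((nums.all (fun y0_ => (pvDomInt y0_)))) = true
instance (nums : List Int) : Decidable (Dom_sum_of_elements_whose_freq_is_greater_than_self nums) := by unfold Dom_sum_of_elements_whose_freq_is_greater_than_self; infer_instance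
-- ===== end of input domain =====

-- ===== PORT A =====
-- B (alternative): sort a copy and scan maximal runs of equal values instead of a hash-map
-- frequency table; the equivalence proved below is about the return value (neither mutates nums).
def sum_of_elements_whose_freq_is_greater_than_self (nums : List Int) : Int :=
  -- the_dict[num] = the_dict.get(num, 0) + 1 over nums
  let the_dict := nums.foldl (fun d num => d.insert num (d.getD num 0 + 1)) PySem.Dict.empty
  -- for num in the_dict: if the_dict[num] >= num: to_return += num
  the_dict.keys.foldl (fun to_return num => if the_dict.getD num 0 ≥ num then to_return + num else to_return) 0

-- ===== PORT B =====
-- the outer while loop of Source B: each step consumes one maximal run (s[i:j]) of the sorted list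
def pvRunScan : List Int → Int
  | [] => 0
  | x :: xs =>
    -- run s[i:j] of the value v = s[i]; j - i = 1 + length of equal values following x
    (if ((xs.takeWhile (fun y => y == x)).length + 1 : Int) ≥ x then x else 0)
      + pvRunScan (xs.dropWhile (fun y => y == x))
termination_by l => l.length
decreasing_by
  simp only [List.length_cons]
  exact Nat.lt_succ_of_le (List.length_dropWhile_le _ _)

def sum_of_elements_whose_freq_is_greater_than_self_alt (nums : List Int) : Int :=
  pvRunScan (PySem.List.sorted nums (fun x => x) false)

-- ===== PRECONDITION & SPEC =====
def Spec_sum_of_elements_whose_freq_is_greater_than_self (nums : List Int) (out : Int) : Prop := out = sum_of_elements_whose_freq_is_greater_than_self_alt nums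
instance (nums : List Int) (out : Int) : Decidable (Spec_sum_of_elements_whose_freq_is_greater_than_self nums out) := by unfold Spec_sum_of_elements_whose_freq_is_greater_than_self; infer_instance

-- ===== CLAIM (what is proved, stated in full; the proofs are below) =====
def Claim_equal_sum_of_elements_whose_freq_is_greater_than_self : Prop := ∀ (nums : List Int), Dom_sum_of_elements_whose_freq_is_greater_than_self nums → Spec_sum_of_elements_whose_freq_is_greater_than_self nums (sum_of_elements_whose_freq_is_greater_than_self nums)

-- ===== LEMMAS AND PROOFS =====

def pvFreqSum (l : List Int) : Int :=
  ∑ v ∈ l.toFinset, (if (l.count v : Int) ≥ v then v else 0)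

lemma runScan_eq_freqSum (l : List Int) (h : l.Pairwise (· ≤ ·)) :
    pvRunScan l = pvFreqSum l := by
  induction l using pvRunScan.induct with
  | case1 => simp [pvRunScan, pvFreqSum]
  | case2 x xs ih =>
    set t := xs.takeWhile (fun y => y == x) with ht
    set d := xs.dropWhile (fun y => y == x) with hd
    have hxs : xs = t ++ d := (List.takeWhile_append_dropWhile).symm
    have htx : ∀ y ∈ t, y = x := fun y hy => by
      simpa using List.mem_takeWhile_imp hy
    have hdpair : d.Pairwise (· ≤ ·) :=
      h.sublist ((List.dropWhile_sublist _).cons x)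
    have hxnotd : x ∉ d := by
      intro hmem
      cases hdd : d with
      | nil => simp [hdd] at hmem
      | cons f r =>
        have hfne : f ≠ x := by
          have := List.head?_dropWhile_not (fun y => y == x) xs
          simp [← hd, hdd] at this
          exact this
        have hxlef : x ≤ f := by
          have hfxs : f ∈ xs := by
            rw [hxs, hdd]; simp
          exact (List.pairwise_cons.mp h).1 f hfxs
        have hflt : x < f := lt_of_le_of_ne hxlef (Ne.symm hfne)
        rw [hdd] at hmem
        rcases List.mem_cons.mp hmem with h1 | h2
        · exact hfne h1.symm
        · have : f ≤ x := by
            rw [hdd] at hdpair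
            exact (List.pairwise_cons.mp hdpair).1 x h2
          omega
    have hcountx : (x :: xs).count x = t.length + 1 := by
      rw [hxs]
      simp [List.count_append,
        List.count_eq_length.mpr (fun b hb => (htx b hb).symm),
        List.count_eq_zero.mpr hxnotd]
    have hcountv : ∀ v ∈ d, (x :: xs).count v = d.count v := by
      intro v hv
      have hvne : v ≠ x := fun hvx => hxnotd (hvx ▸ hv)
      rw [hxs]
      simp [List.count_append, Ne.symm hvne,
        List.count_eq_zero.mpr (fun hvt => hvne (htx v hvt))]
    have hfin : (x :: xs).toFinset = insert x d.toFinset := by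
      ext v
      simp only [List.mem_toFinset, List.mem_cons, Finset.mem_insert, hxs, List.mem_append]
      constructor
      · rintro (rfl | hvt | hvd)
        · exact Or.inl rfl
        · exact Or.inl (htx v hvt)
        · exact Or.inr hvd
      · rintro (rfl | hvd)
        · exact Or.inl rfl
        · exact Or.inr (Or.inr hvd)
    have hxnotfin : x ∉ d.toFinset := fun hx => hxnotd (List.mem_toFinset.mp hx)
    rw [pvRunScan, pvFreqSum, hfin, Finset.sum_insert hxnotfin]
    rw [ih hdpair]
    congr 1
    · rw [hcountx]; push_cast; rw [ht]
    · rw [pvFreqSum]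
      exact Finset.sum_congr rfl (fun v hv => by
        rw [hcountv v (List.mem_toFinset.mp hv)])

lemma foldl_if_add_eq_sum_map (p : Int → Prop) [DecidablePred p] (l : List Int) (a : Int) :
    l.foldl (fun acc v => if p v then acc + v else acc) a
      = a + (l.map (fun v => if p v then v else 0)).sum := by
  induction l generalizing a with
  | nil => simp
  | cons x xs ih =>
    simp only [List.foldl_cons, List.map_cons, List.sum_cons, ih]
    by_cases hp : p x
    · simp [hp]; ring
    · simp [hp]

lemma a_eq_freqSum (nums : List Int) :
    sum_of_elements_whose_freq_is_greater_than_self nums = pvFreqSum nums := by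
  unfold sum_of_elements_whose_freq_is_greater_than_self
  simp only [PySem.Dict.foldl_insert_getD_add_one_eq_counter, PySem.Dict.getD_counter,
    PySem.Dict.keys_counter, ← PySem.List.dedup_eq_ofList]
  rw [foldl_if_add_eq_sum_map (fun v => (nums.count v : Int) ≥ v)]
  have hfin : (PySem.List.dedup nums).toFinset = nums.toFinset := by
    ext v; simp [List.mem_toFinset]
  rw [pvFreqSum, ← hfin,
    List.sum_toFinset _ (PySem.List.nodup_dedup nums)]
  simp


-- ===== VERDICT (by name: the statement is the Claim_ definition above) =====
theorem sum_of_elements_whose_freq_is_greater_than_self_spec : Claim_equal_sum_of_elements_whose_freq_is_greater_than_self := by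
  intro nums _
  unfold Spec_sum_of_elements_whose_freq_is_greater_than_self
  unfold sum_of_elements_whose_freq_is_greater_than_self_alt
  have hperm := PySem.List.sorted_perm nums (fun x => x) false
  rw [runScan_eq_freqSum _ (by simpa using PySem.List.sorted_pairwise nums (fun x => x)),
    a_eq_freqSum]
  unfold pvFreqSum
  rw [List.toFinset_eq_of_perm _ _ hperm]
  exact Finset.sum_congr rfl (fun v _ => by rw [hperm.count_eq])
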